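-- pv_equiv track=rewrite | github.com/wjmmmwjj/auto_piano | playback/song_workflow.py | merge_score_rests
-- ===== SOURCE A (Python) =====
-- def merge_score_rests(score: list[tuple]) -> list[tuple]:
--     merged: list[tuple] = []
--     for item in score:
--         if item[0] == 0 and merged and merged[-1][0] == 0:
--             merged[-1] = (0, int(merged[-1][1]) + int(item[1]))
--         else:
--             merged.append(item)
--     return merged
-- ===== SOURCE B (Python) =====
-- def merge_score_rests(score: list[tuple]) -> list[tuple]:
--     out: list[tuple] = []
--     i, n = 0, len(score)
--     while i < n:
--         is_rest = score[i][0] == 0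
--         j = i + 1
--         while j < n and (score[j][0] == 0) == is_rest:
--             j += 1
--         if is_rest:
--             out.append((0, sum(int(x[1]) for x in score[i:j])))
--         else:
--             out.extend(score[i:j])
--         i = j
--     return out
-- ===== Notes on version B (the rewrite author's own statement) =====
-- stated objective: alternative
-- what changed: B splits the score into maximal runs of equal rest-ness with a two-pointer scan and emits one summed tuple per rest run, instead of A's element-by-element loop that mutates the last element of the output list.
import Mathlib
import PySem

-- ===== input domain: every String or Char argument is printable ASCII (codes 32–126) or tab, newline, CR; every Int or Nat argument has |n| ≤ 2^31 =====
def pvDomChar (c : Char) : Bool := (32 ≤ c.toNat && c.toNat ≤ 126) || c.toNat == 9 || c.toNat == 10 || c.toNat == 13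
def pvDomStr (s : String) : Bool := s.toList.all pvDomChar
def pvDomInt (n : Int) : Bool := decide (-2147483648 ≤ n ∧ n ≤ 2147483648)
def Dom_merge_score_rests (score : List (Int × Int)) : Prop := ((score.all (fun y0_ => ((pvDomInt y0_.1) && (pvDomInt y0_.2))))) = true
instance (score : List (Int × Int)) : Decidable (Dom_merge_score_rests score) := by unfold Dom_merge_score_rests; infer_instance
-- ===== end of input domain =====

-- B rebuilds the output by splitting the score into maximal runs of equal rest-ness and
-- summing each rest run at once, instead of A's per-item loop mutating the last output entry.

-- ===== PORT A =====
-- A's loop body: merged[-1] is read via getLast? (the 'merged and' guard), the in-place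
-- assignment merged[-1] = … becomes dropLast ++ [new]; int() on an int is the identity.
def mergeStepA (merged : List (Int × Int)) (item : Int × Int) : List (Int × Int) :=
  match merged.getLast? with
  | some last =>
      if item.1 = 0 ∧ last.1 = 0 then merged.dropLast ++ [(0, last.2 + item.2)]
      else merged ++ [item]
  | none => merged ++ [item]

def merge_score_rests (score : List (Int × Int)) : List (Int × Int) :=
  score.foldl mergeStepA []

-- ===== PORT B =====
-- B's inner while loop that advances j while the rest-ness stays equal is takeWhile/dropWhile
-- on the tail; score[i:j] is the run.
def mergeRunsB : List (Int × Int) → List (Int × Int)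
  | [] => []
  | x :: xs =>
      if x.1 = 0 then
        (0, ((x :: xs.takeWhile (fun y => y.1 == 0)).map Prod.snd).sum)
          :: mergeRunsB (xs.dropWhile (fun y => y.1 == 0))
      else
        (x :: xs.takeWhile (fun y => !(y.1 == 0)))
          ++ mergeRunsB (xs.dropWhile (fun y => !(y.1 == 0)))
  termination_by l => l.length
  decreasing_by
    · exact Nat.lt_succ_of_le (List.length_dropWhile_le _ _)
    · exact Nat.lt_succ_of_le (List.length_dropWhile_le _ _)

def merge_score_rests_alt (score : List (Int × Int)) : List (Int × Int) :=
  mergeRunsB score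

-- ===== PRECONDITION & SPEC =====
def Spec_merge_score_rests (score : List (Int × Int)) (out : List (Int × Int)) : Prop := out = merge_score_rests_alt score
instance (score : List (Int × Int)) (out : List (Int × Int)) : Decidable (Spec_merge_score_rests score out) := by unfold Spec_merge_score_rests; infer_instance

-- ===== CLAIM (what is proved, stated in full; the proofs are below) =====
def Claim_equal_merge_score_rests : Prop := ∀ (score : List (Int × Int)), Dom_merge_score_rests score → Spec_merge_score_rests score (merge_score_rests score)

-- ===== LEMMAS AND PROOFS =====

-- glueA a out: how A's pending last element a combines with the merged rest of the output.
def glueA (a : Int × Int) (out : List (Int × Int)) : List (Int × Int) :=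
  match out with
  | [] => [a]
  | b :: t => if a.1 = 0 ∧ b.1 = 0 then (0, a.2 + b.2) :: t else a :: b :: t

-- sum of the leading rest run
def restSum (l : List (Int × Int)) : Int :=
  ((l.takeWhile (fun y => y.1 == 0)).map Prod.snd).sum

theorem mergeRunsB_rest (x : Int × Int) (xs : List (Int × Int)) (hx : x.1 = 0) :
    mergeRunsB (x :: xs) =
      (0, x.2 + restSum xs) :: mergeRunsB (xs.dropWhile (fun y => y.1 == 0)) := by
  rw [mergeRunsB]
  simp [hx, restSum]

theorem mergeRunsB_nonrest (x : Int × Int) (xs : List (Int × Int)) (hx : ¬ x.1 = 0) :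
    mergeRunsB (x :: xs) =
      (x :: xs.takeWhile (fun y => !(y.1 == 0)))
        ++ mergeRunsB (xs.dropWhile (fun y => !(y.1 == 0))) := by
  rw [mergeRunsB]
  simp [hx]

-- gluing a rest (0, c) onto B's output absorbs the leading rest run
theorem glueA_rest (c : Int) (l : List (Int × Int)) :
    glueA (0, c) (mergeRunsB l) =
      (0, c + restSum l) :: mergeRunsB (l.dropWhile (fun y => y.1 == 0)) := by
  match l with
  | [] => simp [glueA, restSum, mergeRunsB]
  | j :: l'' =>
    by_cases hj : j.1 = 0
    · have hjb : (j.1 == 0) = true := by simp [hj]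
      rw [mergeRunsB_rest j l'' hj]
      simp [glueA, restSum, hjb]
    · have hjb : (j.1 == 0) = false := by simp [hj]
      rw [mergeRunsB_nonrest j l'' hj]
      simp [glueA, restSum, hjb, hj]
      rw [mergeRunsB_nonrest j l'' hj, List.cons_append]

-- B's output on a list starting with its non-rest run
theorem mergeRunsB_nonrest_run (l : List (Int × Int)) :
    l.takeWhile (fun y => !(y.1 == 0)) ++ mergeRunsB (l.dropWhile (fun y => !(y.1 == 0)))
      = mergeRunsB l := by
  match l with
  | [] => simp
  | x :: xs =>
    by_cases hx : x.1 = 0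
    · have hxb : (x.1 == 0) = true := by simp [hx]
      simp [hxb]
    · have hxb : (x.1 == 0) = false := by simp [hx]
      rw [mergeRunsB_nonrest x xs hx]
      simp [hxb]

-- main invariant: A's fold from accumulator m ++ [a] is m ++ (a glued onto B's result)
theorem foldA_glue (l : List (Int × Int)) :
    ∀ (m : List (Int × Int)) (a : Int × Int),
      List.foldl mergeStepA (m ++ [a]) l = m ++ glueA a (mergeRunsB l) := by
  induction l with
  | nil => intro m a; simp [glueA, mergeRunsB]
  | cons i l' ih =>
    intro m a
    by_cases h : i.1 = 0 ∧ a.1 = 0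
    · have hstep : mergeStepA (m ++ [a]) i = m ++ [((0 : Int), a.2 + i.2)] := by
        simp [mergeStepA, h.1, h.2]
      rw [List.foldl_cons, hstep, ih m ((0 : Int), a.2 + i.2), glueA_rest,
        mergeRunsB_rest i l' h.1]
      have ha2 : a = ((0 : Int), a.2) := by cases a; simp_all
      conv_rhs => rw [ha2]
      simp [glueA, add_assoc]
    · have hstep : mergeStepA (m ++ [a]) i = (m ++ [a]) ++ [i] := by
        by_cases hi : i.1 = 0
        · have ha : ¬ a.1 = 0 := fun hh => h ⟨hi, hh⟩
          simp [mergeStepA, hi, ha]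
        · simp [mergeStepA, hi]
      rw [List.foldl_cons, hstep, ih (m ++ [a]) i]
      have key : glueA a (mergeRunsB (i :: l')) = a :: glueA i (mergeRunsB l') := by
        by_cases hi : i.1 = 0
        · have ha : ¬ a.1 = 0 := fun hh => h ⟨hi, hh⟩
          have hieq : i = ((0 : Int), i.2) := by cases i; simp_all
          rw [mergeRunsB_rest i l' hi]
          conv_rhs => rw [hieq]
          rw [glueA_rest]
          simp [glueA, ha]
        · rw [mergeRunsB_nonrest i l' hi]
          rw [show (i :: List.takeWhile (fun y => !(y.1 == 0)) l')
              ++ mergeRunsB (List.dropWhile (fun y => !(y.1 == 0)) l')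
              = i :: mergeRunsB l' from by
            rw [List.cons_append, mergeRunsB_nonrest_run l']]
          cases hm : mergeRunsB l' with
          | nil => simp [glueA, hi]
          | cons b t => simp [glueA, hi]
      rw [key]
      simp

-- ===== VERDICT (by name: the statement is the Claim_ definition above) =====
theorem merge_score_rests_spec : Claim_equal_merge_score_rests := by
  intro score _
  unfold Spec_merge_score_rests merge_score_rests merge_score_rests_alt
  match score with
  | [] => simp [mergeRunsB]
  | i :: l' =>
    have hstep : mergeStepA [] i = [] ++ [i] := by simp [mergeStepA]
    rw [List.foldl_cons, hstep, foldA_glue l' [] i, List.nil_append]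
    by_cases hi : i.1 = 0
    · have hieq : i = ((0 : Int), i.2) := by cases i; simp_all
      rw [mergeRunsB_rest i l' hi]
      conv_lhs => rw [hieq]
      rw [glueA_rest]
    · rw [mergeRunsB_nonrest i l' hi, List.cons_append, mergeRunsB_nonrest_run l']
      cases hm : mergeRunsB l' with
      | nil => simp [glueA]
      | cons b t => simp [glueA, hi]
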